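-- pv_equiv track=rewrite | github.com/remi-dupre/verdandi | verdandi/util/draw.py | points_for_shade
-- ===== SOURCE A (Python) =====
-- def xy_to_bounds(
--     xy: tuple[int, int, int, int],
-- ) -> tuple[tuple[int, int], tuple[int, int]]:
--     """
--     Convert a list of coords (x1, y1, x2, y2) to bounds
--     ((x_min, x_max), (y_min, y_max)).
--     """
--     x_min, x_max = min(xy[0::2]), max(xy[0::2])
--     y_min, y_max = min(xy[1::2]), max(xy[1::2])
--     return ((x_min, x_max), (y_min, y_max))
--
-- def points_for_shade(
--     xy: tuple[int, int, int, int],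
--     spacing: int = 2,
-- ) -> list[tuple[int, int]]:
--     """
--     Return a list of points to color to asign a rectangle with a shade of gray.
--     """
--
--     (x_min, x_max), (y_min, y_max) = xy_to_bounds(xy)
--
--     match spacing:
--         case _:
--             u, v = 7, 11
--
--     return [
--         (x, y)
--         for x in range(x_min, x_max + 1)
--         for y in range(y_min, y_max + 1)
--         if (u * x + v * y) % spacing == 0
--     ]
-- ===== SOURCE B (Python) =====
-- from math import gcd
--
-- def points_for_shade(xy, spacing=2):
--     x_min, x_max = min(xy[0::2]), max(xy[0::2])
--     y_min, y_max = min(xy[1::2]), max(xy[1::2])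
--     # valid y's in a column form an arithmetic progression with step d:
--     # (7x + 11y) % spacing == 0 depends only on y mod d, d = |spacing| // gcd(11, |spacing|)
--     m = abs(spacing)
--     d = m // gcd(11, m)
--     points = []
--     for x in range(x_min, x_max + 1):
--         for t in range(min(d, y_max - y_min + 1)):
--             if (7 * x + 11 * (y_min + t)) % spacing == 0:
--                 points.extend((x, y) for y in range(y_min + t, y_max + 1, d))
--                 break
--     return points
-- ===== Notes on version B (the rewrite author's own statement) =====
-- stated objective: faster
-- what changed: Instead of testing (7x+11y)%spacing==0 for every cell of the rectangle, B scans one period d=|spacing|//gcd(11,|spacing|) per column to find the first valid y and then emits the whole column as an arithmetic progression with step d.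
import Mathlib
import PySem

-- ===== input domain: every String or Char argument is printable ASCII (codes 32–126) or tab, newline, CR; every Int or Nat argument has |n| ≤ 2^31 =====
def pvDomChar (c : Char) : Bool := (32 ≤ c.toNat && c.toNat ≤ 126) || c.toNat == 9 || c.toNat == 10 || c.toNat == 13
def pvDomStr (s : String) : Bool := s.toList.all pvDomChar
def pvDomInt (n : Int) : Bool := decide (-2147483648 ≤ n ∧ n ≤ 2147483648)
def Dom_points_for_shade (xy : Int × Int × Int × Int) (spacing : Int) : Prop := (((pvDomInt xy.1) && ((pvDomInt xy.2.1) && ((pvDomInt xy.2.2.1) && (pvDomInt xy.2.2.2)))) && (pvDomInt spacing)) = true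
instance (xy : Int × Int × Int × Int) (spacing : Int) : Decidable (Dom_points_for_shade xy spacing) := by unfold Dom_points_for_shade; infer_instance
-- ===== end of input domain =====

-- B replaces A's per-cell divisibility test by per-column arithmetic progressions of valid y's (period |spacing|/gcd(11,|spacing|)).

-- ===== PORT A =====
def xy_to_bounds (xy : Int × Int × Int × Int) : (Int × Int) × (Int × Int) :=
  ((min xy.1 xy.2.2.1, max xy.1 xy.2.2.1), (min xy.2.1 xy.2.2.2, max xy.2.1 xy.2.2.2))

def points_for_shade (xy : Int × Int × Int × Int) (spacing : Int) : List (Int × Int) :=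
  let b := xy_to_bounds xy
  let u : Int := 7
  let v : Int := 11
  (PySem.List.pyRange b.1.1 (b.1.2 + 1) 1).flatMap fun x =>
    ((PySem.List.pyRange b.2.1 (b.2.2 + 1) 1).filter
        (fun y => PySem.Int.mod (u * x + v * y) spacing == 0)).map fun y => (x, y)

-- ===== PORT B =====
-- the inner 'for t in range(d): if …: …; break' loop of Source B
def psAltScan (c : Int → Bool) : Int → Nat → Option Int
  | _, 0 => none
  | y, Nat.succ k => if c y then some y else psAltScan c (y + 1) k

def points_for_shade_alt (xy : Int × Int × Int × Int) (spacing : Int) : List (Int × Int) :=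
  let x_min := min xy.1 xy.2.2.1
  let x_max := max xy.1 xy.2.2.1
  let y_min := min xy.2.1 xy.2.2.2
  let y_max := max xy.2.1 xy.2.2.2
  let m := |spacing|
  let d := PySem.Int.floordiv m ((Nat.gcd 11 m.toNat : Nat) : Int)
  (PySem.List.pyRange x_min (x_max + 1) 1).foldl
    (fun points x =>
      points ++
        match psAltScan (fun y => PySem.Int.mod (7 * x + 11 * y) spacing == 0) y_min
            (min d (y_max - y_min + 1)).toNat with
        | none => []
        | some y0 => (PySem.List.pyRange y0 (y_max + 1) d).map fun y => (x, y))
    []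

-- ===== PRECONDITION & SPEC =====
-- Python A evaluates (…) % spacing on a never-empty rectangle, so it raises ZeroDivisionError exactly when
-- spacing == 0 (Pre_ excludes only that; Python B returns [] there).
def Pre_points_for_shade (_xy : Int × Int × Int × Int) (spacing : Int) : Prop := spacing ≠ 0
instance (xy : Int × Int × Int × Int) (spacing : Int) : Decidable (Pre_points_for_shade xy spacing) := by unfold Pre_points_for_shade; infer_instance
def pvWitness_points_for_shade : (Int × Int × Int × Int) × Int := ((0, 0, 4, 4), 2)

def Spec_points_for_shade (xy : Int × Int × Int × Int) (spacing : Int) (out : List (Int × Int)) : Prop := out = points_for_shade_alt xy spacing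
instance (xy : Int × Int × Int × Int) (spacing : Int) (out : List (Int × Int)) : Decidable (Spec_points_for_shade xy spacing out) := by unfold Spec_points_for_shade; infer_instance

-- ===== CLAIM (what is proved, stated in full; the proofs are below) =====
def Claim_equal_points_for_shade : Prop := ∀ (xy : Int × Int × Int × Int) (spacing : Int), Dom_points_for_shade xy spacing → Pre_points_for_shade xy spacing → Spec_points_for_shade xy spacing (points_for_shade xy spacing)

-- ===== LEMMAS AND PROOFS =====

lemma psAltScan_eq_none {c : Int → Bool} : ∀ (k : Nat) (y : Int),
    psAltScan c y k = none ↔ ∀ z, y ≤ z → z < y + k → c z = false := by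
  intro k
  induction k with
  | zero => intro y; simp [psAltScan]; intro z h1 h2; omega
  | succ k ih =>
    intro y
    simp only [psAltScan]
    by_cases h : c y
    · simp [h]
      exact ⟨y, le_rfl, by omega, h⟩
    · simp [h, ih (y + 1)]
      constructor
      · intro hall z h1 h2
        rcases eq_or_lt_of_le h1 with rfl | hlt
        · exact Bool.not_eq_true _ |>.mp h
        · exact hall z (by omega) (by omega)
      · intro hall z h1 h2
        exact hall z (by omega) (by omega)

lemma psAltScan_eq_some {c : Int → Bool} : ∀ (k : Nat) (y y0 : Int),
    psAltScan c y k = some y0 →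
      c y0 = true ∧ y ≤ y0 ∧ y0 < y + k ∧ ∀ z, y ≤ z → z < y0 → c z = false := by
  intro k
  induction k with
  | zero => intro y y0 h; simp [psAltScan] at h
  | succ k ih =>
    intro y y0 h
    simp only [psAltScan] at h
    by_cases hc : c y
    · simp [hc] at h
      subst h
      exact ⟨hc, le_rfl, by omega, fun z h1 h2 => by omega⟩
    · simp [hc] at h
      obtain ⟨h1, h2, h3, h4⟩ := ih (y + 1) y0 h
      refine ⟨h1, by omega, by push_cast at h3 ⊢; omega, fun z hz1 hz2 => ?_⟩
      rcases eq_or_lt_of_le hz1 with rfl | hlt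
      · exact Bool.not_eq_true _ |>.mp hc
      · exact h4 z (by omega) hz2

lemma keyM_dvd (M : Nat) : ((M : Int)) ∣ 11 * ((M / Nat.gcd 11 M : Nat) : Int) := by
  have hg11 : Nat.gcd 11 M ∣ 11 := Nat.gcd_dvd_left _ _
  have hgM : Nat.gcd 11 M ∣ M := Nat.gcd_dvd_right _ _
  have : M ∣ 11 * (M / Nat.gcd 11 M) := by
    refine ⟨11 / Nat.gcd 11 M, ?_⟩
    calc 11 * (M / Nat.gcd 11 M) = (11 / Nat.gcd 11 M * Nat.gcd 11 M) * (M / Nat.gcd 11 M) := by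
          rw [Nat.div_mul_cancel hg11]
      _ = (Nat.gcd 11 M * (M / Nat.gcd 11 M)) * (11 / Nat.gcd 11 M) := by ring
      _ = M * (11 / Nat.gcd 11 M) := by rw [Nat.mul_div_cancel' hgM]
  exact_mod_cast Int.natCast_dvd_natCast.mpr this

lemma keyD_dvd (M : Nat) (_hM : 0 < M) (z : Int) (h : ((M : Int)) ∣ 11 * z) :
    ((M / Nat.gcd 11 M : Nat) : Int) ∣ z := by
  set g := Nat.gcd 11 M with hg
  have hgpos : 0 < g := Nat.gcd_pos_of_pos_left _ (by norm_num)
  have hg11 : g ∣ 11 := Nat.gcd_dvd_left _ _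
  have hgM : g ∣ M := Nat.gcd_dvd_right _ _
  have hM' : (M : Int) = (g : Int) * ((M / g : Nat) : Int) := by
    exact_mod_cast (Nat.mul_div_cancel' hgM).symm
  have h11 : (11 : Int) = (g : Int) * ((11 / g : Nat) : Int) := by
    exact_mod_cast (Nat.mul_div_cancel' hg11).symm
  rw [hM', h11, mul_assoc] at h
  have h2 : ((M / g : Nat) : Int) ∣ ((11 / g : Nat) : Int) * z :=
    (mul_dvd_mul_iff_left (by exact_mod_cast hgpos.ne' : ((g:Nat):Int) ≠ 0)).mp h
  have hcop : Nat.Coprime (M / g) (11 / g) := (Nat.coprime_div_gcd_div_gcd hgpos).symm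
  have : IsCoprime ((M / g : Nat) : Int) ((11 / g : Nat) : Int) := by
    rw [Int.isCoprime_iff_gcd_eq_one]
    simpa [Int.gcd] using hcop
  exact this.dvd_of_dvd_mul_left h2

lemma pyRange_step_succ_right (y0 b D : Int) (hD : 0 < D) :
    PySem.List.pyRange y0 (b + 1) D =
      PySem.List.pyRange y0 b D ++ (if y0 ≤ b ∧ D ∣ (b - y0) then [b] else []) := by
  rw [PySem.List.pyRange_of_pos _ _ hD, PySem.List.pyRange_of_pos _ _ hD]
  by_cases hc : y0 ≤ b ∧ D ∣ (b - y0)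
  · have hle := hc.1
    obtain ⟨k, hk⟩ := hc.2
    have hk' : b - y0 = k * D := by rw [hk]; ring
    have hk0 : 0 ≤ k := by
      by_contra h
      have : k * D ≤ -1 * D := by
        apply mul_le_mul_of_nonneg_right (by omega) hD.le
      omega
    have h1 : y0 < b + 1 := by omega
    have hq1 : (b + 1 - y0 + D - 1) / D = k + 1 := by
      have he : b + 1 - y0 + D - 1 = D + k * D := by omega
      rw [he, Int.add_mul_ediv_right _ _ hD.ne', Int.ediv_self hD.ne']; omega
    by_cases h2 : y0 < b
    · have hq2 : (b - y0 + D - 1) / D = k := by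
        have he : b - y0 + D - 1 = (D - 1) + k * D := by omega
        rw [he, Int.add_mul_ediv_right _ _ hD.ne',
          Int.ediv_eq_zero_of_lt (by omega) (by omega)]
        omega
      simp only [if_pos hc, if_pos h1, if_pos h2, hq1, hq2]
      have hkn : (k + 1).toNat = k.toNat + 1 := by omega
      rw [hkn, List.range_succ, List.map_append]
      simp only [List.map_cons, List.map_nil]
      congr 2
      have hkk : (k.toNat : Int) = k := by omega
      rw [hkk]
      omega
    · have hb : y0 = b := by omega
      have hkD : k * D = 0 := by omega
      have hk0' : k = 0 := by
        rcases mul_eq_zero.mp hkD with h | h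
        · exact h
        · omega
      simp only [if_pos hc, if_pos h1, if_neg h2, hq1, hk0']
      simp [hb]
  · simp only [if_neg hc]
    by_cases h2 : y0 ≤ b
    · have hnd : ¬ D ∣ (b - y0) := fun h => hc ⟨h2, h⟩
      have hlt : y0 < b := lt_of_le_of_ne h2 (fun h => hnd (by rw [h]; simp))
      have h1 : y0 < b + 1 := by omega
      set q := (b - y0) / D with hq
      set r := (b - y0) % D with hr
      have hqr : b - y0 = D * q + r := by rw [hq, hr, Int.emod_def]; ring
      have hqr' : b - y0 = q * D + r := by rw [hqr]; ring
      have hr0 : 0 < r := by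
        rcases (Int.emod_nonneg (b - y0) hD.ne').lt_or_eq with h | h
        · exact h
        · exact absurd (Int.dvd_of_emod_eq_zero h.symm) hnd
      have hrD : r < D := Int.emod_lt_of_pos _ hD
      have e1 : (b - y0 + D - 1) / D = q + 1 := by
        have he : b - y0 + D - 1 = (r + D - 1) + q * D := by omega
        rw [he, Int.add_mul_ediv_right _ _ hD.ne']
        have h3 : r + D - 1 = (r - 1) + 1 * D := by ring
        rw [h3, Int.add_mul_ediv_right _ _ hD.ne',
          Int.ediv_eq_zero_of_lt (by omega) (by omega)]
        omega
      have e2 : (b + 1 - y0 + D - 1) / D = q + 1 := by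
        have he : b + 1 - y0 + D - 1 = (r + D) + q * D := by omega
        rw [he, Int.add_mul_ediv_right _ _ hD.ne']
        have h3 : r + D = r + 1 * D := by ring
        rw [h3, Int.add_mul_ediv_right _ _ hD.ne',
          Int.ediv_eq_zero_of_lt (by omega) (by omega)]
        omega
      rw [if_pos h1, if_pos hlt, e1, e2, List.append_nil]
    · have h1 : ¬ y0 < b + 1 := by omega
      have h2' : ¬ y0 < b := by omega
      rw [if_neg h1, if_neg h2']
      simp

lemma pyRange_step_eq_nil (y0 b D : Int) (hD : 0 < D) (h : b ≤ y0) :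
    PySem.List.pyRange y0 b D = [] := by
  rw [PySem.List.pyRange_of_pos _ _ hD, if_neg (by omega)]
  simp

lemma filter_eq_pyRange_step (c : Int → Bool) (D y0 a : Int) (hD : 0 < D) (ha : a ≤ y0)
    (hchar : ∀ y, a ≤ y → (c y = true ↔ (y0 ≤ y ∧ D ∣ (y - y0)))) :
    ∀ n : Nat, (PySem.List.pyRange a (a + n) 1).filter c = PySem.List.pyRange y0 (a + n) D := by
  intro n
  induction n with
  | zero =>
    simp only [Nat.cast_zero, add_zero]
    rw [PySem.List.pyRange_one_eq_nil le_rfl, pyRange_step_eq_nil _ _ _ hD ha]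
    rfl
  | succ k ih =>
    have hcast : a + ((k + 1 : Nat) : Int) = (a + (k : Nat)) + 1 := by push_cast; ring
    rw [hcast, PySem.List.pyRange_one_succ_right (by omega), List.filter_append, ih,
      pyRange_step_succ_right _ _ _ hD]
    congr 1
    by_cases h : y0 ≤ a + (k : Nat) ∧ D ∣ (a + (k : Nat) - y0)
    · rw [if_pos h]
      simp [List.filter, (hchar _ (by omega)).mpr h]
    · rw [if_neg h]
      have : ¬ c (a + (k : Nat)) = true := fun hc => h ((hchar _ (by omega)).mp hc)
      simp [List.filter, Bool.not_eq_true _ |>.mp this]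

lemma per_x (s x ymin ymax : Int) (hs : s ≠ 0) (hyy : ymin ≤ ymax + 1) :
    (match psAltScan (fun y => PySem.Int.mod (7 * x + 11 * y) s == 0) ymin
        (min (PySem.Int.floordiv |s| ((Nat.gcd 11 |s|.toNat : Nat) : Int))
          (ymax - ymin + 1)).toNat with
      | none => ([] : List (Int × Int))
      | some y0 => (PySem.List.pyRange y0 (ymax + 1)
          (PySem.Int.floordiv |s| ((Nat.gcd 11 |s|.toNat : Nat) : Int))).map fun y => (x, y))
    = ((PySem.List.pyRange ymin (ymax + 1) 1).filter
        (fun y => PySem.Int.mod (7 * x + 11 * y) s == 0)).map fun y => (x, y) := by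
  set M := s.natAbs with hM
  have hMpos : 0 < M := Int.natAbs_pos.mpr hs
  have habs : |s| = (M : Int) := Int.abs_eq_natAbs s
  have htn : (|s|).toNat = M := by rw [habs]; exact Int.toNat_natCast M
  have hdval : PySem.Int.floordiv |s| ((Nat.gcd 11 |s|.toNat : Nat) : Int)
      = ((M / Nat.gcd 11 M : Nat) : Int) := by
    rw [habs, Int.toNat_natCast]; exact PySem.Int.floordiv_natCast M (Nat.gcd 11 M)
  set Dn := M / Nat.gcd 11 M with hDn
  have hDpos : 0 < Dn := Nat.div_pos (Nat.le_of_dvd hMpos (Nat.gcd_dvd_right _ _))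
    (Nat.gcd_pos_of_pos_left _ (by norm_num))
  have hdpos : (0:Int) < (Dn:Int) := by exact_mod_cast hDpos
  set c : Int → Bool := fun y => PySem.Int.mod (7 * x + 11 * y) s == 0 with hc
  have hcdvd : ∀ y, c y = true ↔ (M:Int) ∣ (7 * x + 11 * y) := by
    intro y
    rw [hc]
    simp only [beq_iff_eq, PySem.Int.mod_eq_zero_iff_dvd]
    exact ⟨fun h => Int.natAbs_dvd.mpr h, fun h => Int.natAbs_dvd.mp h⟩
  have hshift : ∀ y y', (Dn:Int) ∣ (y' - y) → c y = true → c y' = true := by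
    intro y y' hd hy
    obtain ⟨k, hk⟩ := hd
    rw [hcdvd] at hy ⊢
    have h1 : (M:Int) ∣ 11 * (y' - y) := by
      rw [hk, show (11 : Int) * ((Dn:Int) * k) = (11 * (Dn:Int)) * k by ring]
      exact Dvd.dvd.mul_right (keyM_dvd M) k
    have he : 7 * x + 11 * y' = (7 * x + 11 * y) + 11 * (y' - y) := by ring
    rw [he]
    exact dvd_add hy h1
  have hspaced : ∀ y y', c y = true → c y' = true → (Dn:Int) ∣ (y' - y) := by
    intro y y' hy hy'
    rw [hcdvd] at hy hy'
    apply keyD_dvd M hMpos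
    have he : 11 * (y' - y) = (7 * x + 11 * y') - (7 * x + 11 * y) := by ring
    rw [he]
    exact dvd_sub hy' hy
  rw [hdval]
  cases hscan : psAltScan c ymin ((min ((Dn : Nat) : Int) (ymax - ymin + 1)).toNat) with
  | none =>
    have hall := (psAltScan_eq_none _ ymin).mp hscan
    have hKcast : (((min ((Dn : Nat) : Int) (ymax - ymin + 1)).toNat : Nat) : Int)
        = min ((Dn : Nat) : Int) (ymax - ymin + 1) := by omega
    have hfil : (PySem.List.pyRange ymin (ymax + 1) 1).filter c = [] := by
      apply List.filter_eq_nil_iff.mpr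
      intro y hy
      rw [PySem.List.mem_pyRange_one] at hy
      intro hcy
      have hr0 : 0 ≤ (y - ymin) % (Dn:Int) := Int.emod_nonneg _ hdpos.ne'
      have hrD : (y - ymin) % (Dn:Int) < (Dn:Int) := Int.emod_lt_of_pos _ hdpos
      have hq0 : 0 ≤ (y - ymin) / (Dn:Int) := Int.ediv_nonneg (by omega) hdpos.le
      have hDq : 0 ≤ (Dn:Int) * ((y - ymin) / (Dn:Int)) := mul_nonneg hdpos.le hq0
      have hmd := Int.emod_def (y - ymin) ((Dn:Nat):Int)
      have h5 : (Dn:Int) ∣ ((y - ymin) - (y - ymin) % (Dn:Int)) :=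
        ⟨(y - ymin) / (Dn:Int), by rw [Int.emod_def]; ring⟩
      have hdvd : (Dn:Int) ∣ ((ymin + (y - ymin) % (Dn:Int)) - y) := by
        have h6 := dvd_neg.mpr h5
        convert h6 using 1
        ring
      have hct := hshift y (ymin + (y - ymin) % (Dn:Int)) hdvd hcy
      rw [hall _ (by omega) (by omega)] at hct
      exact Bool.false_ne_true hct
    rw [hfil]
    rfl
  | some y0 =>
    obtain ⟨h1, h2, _h3, h4⟩ := psAltScan_eq_some _ ymin y0 hscan
    have hchar : ∀ y, ymin ≤ y → (c y = true ↔ (y0 ≤ y ∧ (Dn:Int) ∣ (y - y0))) := by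
      intro y hy
      constructor
      · intro hcy
        have hd := hspaced y0 y h1 hcy
        refine ⟨?_, hd⟩
        by_contra hlt
        have h5 := h4 y hy (by omega)
        rw [h5] at hcy
        exact Bool.false_ne_true hcy
      · intro ⟨_, hd⟩
        exact hshift y0 y hd h1
    have hfil := filter_eq_pyRange_step c (Dn:Int) y0 ymin hdpos h2 hchar
      (ymax + 1 - ymin).toNat
    rw [show ymin + (((ymax + 1 - ymin).toNat : Nat) : Int) = ymax + 1 by omega] at hfil
    rw [hfil]

-- ===== VERDICT (by name: the statement is the Claim_ definition above) =====
theorem points_for_shade_spec : Claim_equal_points_for_shade := by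
  intro xy spacing _hdom hpre
  unfold Spec_points_for_shade points_for_shade points_for_shade_alt xy_to_bounds
  simp only []
  rw [PySem.List.foldl_append_eq_flatMap]
  rw [List.nil_append]
  congr 1
  funext x
  have hyy : min xy.2.1 xy.2.2.2 ≤ max xy.2.1 xy.2.2.2 + 1 :=
    le_trans (min_le_max) (by omega)
  exact (per_x spacing x (min xy.2.1 xy.2.2.2) (max xy.2.1 xy.2.2.2) hpre hyy).symm
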